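-- pv_equiv track=rewrite | github.com/dominicbeesley/blitter-vhdl-6502 | src/hdl/modelC20K/doc/tim_cpu_mux_gen.py | multidot
-- ===== SOURCE A (Python) =====
-- def multidot(s):
-- 	if len(s) > 2:
-- 		ret = s[0]
-- 		for i in range(1, len(s)):
-- 			if s[i] == s[i-1]:
-- 				ret = ret + "."
-- 			else:
-- 				ret = ret + s[i]
--
-- 		return ret
-- 	else:
-- 		return s
-- ===== SOURCE B (Python) =====
-- from itertools import groupby
--
-- def multidot(s):
--     if len(s) > 2:
--         parts = []
--         for c, run in groupby(s):
--             L = sum(1 for _ in run)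
--             parts.append(c + "." * (L - 1))
--         return "".join(parts)
--     else:
--         return s
-- ===== Notes on version B (the rewrite author's own statement) =====
-- stated objective: idiomatic
-- what changed: Replaces the index loop comparing s[i] with s[i-1] with an itertools.groupby pass over maximal runs of equal characters, emitting each run's head plus dots and joining the pieces once.
import Mathlib
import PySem

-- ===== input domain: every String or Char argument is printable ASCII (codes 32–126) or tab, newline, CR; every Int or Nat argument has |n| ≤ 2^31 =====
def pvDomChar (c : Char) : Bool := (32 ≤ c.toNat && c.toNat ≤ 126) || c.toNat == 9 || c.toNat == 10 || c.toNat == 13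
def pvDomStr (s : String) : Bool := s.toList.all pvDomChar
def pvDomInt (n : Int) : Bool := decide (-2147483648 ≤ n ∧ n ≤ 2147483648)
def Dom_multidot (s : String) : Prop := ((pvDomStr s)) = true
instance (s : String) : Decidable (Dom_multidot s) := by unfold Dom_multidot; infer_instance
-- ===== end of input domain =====

-- B replaces the index loop by a run-based (groupby) traversal; same return value everywhere.

-- ===== PORT A =====
-- the for-loop: prev carries s[i-1], one output char per i
def multidotLoopA : List Char → Char → List Char
  | [], _ => []
  | c :: rest, prev => (if c == prev then '.' else c) :: multidotLoopA rest c

def multidot (s : String) : String :=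
  if s.toList.length > 2 then
    match s.toList with
    | [] => s
    | c :: rest => String.mk (c :: multidotLoopA rest c)
  else s

-- ===== PORT B =====
-- groupby: peel one maximal run at a time; head char kept, rest of the run becomes dots
def multidotRuns : List Char → List Char
  | [] => []
  | c :: cs =>
    c :: ((cs.takeWhile (· == c)).map (fun _ => '.') ++ multidotRuns (cs.dropWhile (· == c)))
termination_by l => l.length
decreasing_by
  simp only [List.length_cons]
  exact Nat.lt_succ_of_le (List.length_dropWhile_le _ _)

def multidot_alt (s : String) : String :=
  if s.toList.length > 2 then String.mk (multidotRuns s.toList) else s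

-- ===== PRECONDITION & SPEC =====
def Spec_multidot (s : String) (out : String) : Prop := out = multidot_alt s
instance (s : String) (out : String) : Decidable (Spec_multidot s out) := by unfold Spec_multidot; infer_instance

-- ===== CLAIM (what is proved, stated in full; the proofs are below) =====
def Claim_equal_multidot : Prop := ∀ (s : String), Dom_multidot s → Spec_multidot s (multidot s)

-- ===== LEMMAS AND PROOFS =====
theorem loopA_eq_runs (cs : List Char) : ∀ c : Char, c :: multidotLoopA cs c = multidotRuns (c :: cs) := by
  induction cs with
  | nil => intro c; simp [multidotLoopA, multidotRuns]
  | cons d ds ih =>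
    intro c
    by_cases h : d = c
    · subst h
      have hIH := ih d
      rw [multidotRuns] at hIH
      have htl := List.cons_injective hIH
      rw [multidotRuns]
      simp [multidotLoopA, htl]
    · have hb : (d == c) = false := by simp [h]
      rw [multidotRuns]
      simp [multidotLoopA, hb, ih d]

-- ===== VERDICT (by name: the statement is the Claim_ definition above) =====
theorem multidot_spec : Claim_equal_multidot := by
  intro s _
  unfold Spec_multidot multidot multidot_alt
  split
  · cases h : s.toList with
    | nil => simp_all
    | cons c rest => exact congrArg String.mk (loopA_eq_runs rest c)
  · rfl
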